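-- pv_equiv track=rewrite | github.com/nikhitkumar00/GFG-solutions-python | Count the zeroes.py | countZeroes
-- ===== SOURCE A (Python) =====
-- def countZeroes(arr, n):
--     arr.reverse()
--     count = 0
--     for i in arr:
--         if i == 0:
--             count += 1
--         else:
--             break
--     return count
-- ===== SOURCE B (Python) =====
-- def countZeroes(arr, n):
--     # Single forward pass: track the position just past the last non-zero
--     # element; the trailing zeros are everything after it. (Does not mutate
--     # arr, unlike A which reverses it in place.)
--     last = 0
--     for i, v in enumerate(arr):
--         if v != 0:
--             last = i + 1
--     return len(arr) - last
-- ===== Notes on version B (the rewrite author's own statement) =====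
-- stated objective: alternative
-- what changed: B counts trailing zeros in one forward pass by remembering the index just past the last non-zero element, instead of reversing the list in place and scanning with a break; B also leaves arr unmutated.
import Mathlib
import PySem

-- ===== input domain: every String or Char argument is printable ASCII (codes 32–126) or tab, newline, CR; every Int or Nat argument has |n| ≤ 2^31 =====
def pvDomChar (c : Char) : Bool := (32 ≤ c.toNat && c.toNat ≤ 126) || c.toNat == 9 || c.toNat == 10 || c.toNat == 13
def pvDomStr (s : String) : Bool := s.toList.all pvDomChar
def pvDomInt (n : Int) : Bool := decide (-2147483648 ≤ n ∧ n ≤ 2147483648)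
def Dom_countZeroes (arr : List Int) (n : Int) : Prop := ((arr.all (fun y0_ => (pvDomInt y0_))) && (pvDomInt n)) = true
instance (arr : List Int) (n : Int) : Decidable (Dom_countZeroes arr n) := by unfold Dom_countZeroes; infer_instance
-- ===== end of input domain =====

-- B counts trailing zeros with one forward pass (index past the last non-zero) instead of A's
-- in-place reverse-and-break scan; same O(n) cost, different traversal, and B does not mutate arr
-- (the equivalence proved is about the return value only).


-- ===== PORT A =====
-- Python A: arr.reverse(); then count leading zeros of the reversed list,
-- breaking at the first non-zero (A mutates arr in place; the equivalence is
-- about the return value only).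
def countZeroesGoA : List Int → Int
  | [] => 0
  | x :: xs => if x = 0 then countZeroesGoA xs + 1 else 0

def countZeroes (arr : List Int) (n : Int) : Int :=
  countZeroesGoA arr.reverse

-- ===== PORT B =====
-- Python B: one forward pass over enumerate(arr) tracking the index just past
-- the last non-zero element; answer = len(arr) - last.
def countZeroes_alt (arr : List Int) (n : Int) : Int :=
  let last := (PySem.List.enumerate arr).foldl
      (fun last p => if p.2 ≠ 0 then p.1 + 1 else last) 0
  (arr.length : Int) - last

-- ===== PRECONDITION & SPEC =====
def Spec_countZeroes (arr : List Int) (n : Int) (out : Int) : Prop := out = countZeroes_alt arr n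
instance (arr : List Int) (n : Int) (out : Int) : Decidable (Spec_countZeroes arr n out) := by unfold Spec_countZeroes; infer_instance

-- ===== CLAIM (what is proved, stated in full; the proofs are below) =====
def Claim_equal_countZeroes : Prop := ∀ (arr : List Int) (n : Int), Dom_countZeroes arr n → Spec_countZeroes arr n (countZeroes arr n)

-- ===== LEMMAS AND PROOFS =====

-- ===== VERDICT (by name: the statement is the Claim_ definition above) =====
-- last-nonzero fold over enumerate, as used by countZeroes_alt
def lastNZ (arr : List Int) : Int :=
  (PySem.List.enumerate arr).foldl (fun last p => if p.2 ≠ 0 then p.1 + 1 else last) 0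

theorem lastNZ_append (xs : List Int) (x : Int) :
    lastNZ (xs ++ [x]) = if x ≠ 0 then (xs.length : Int) + 1 else lastNZ xs := by
  simp [lastNZ, PySem.List.enumerate_append, List.foldl_append,
    PySem.List.enumerate_cons, PySem.List.enumerate_nil]

theorem lastNZ_le (xs : List Int) : lastNZ xs ≤ (xs.length : Int) := by
  induction xs using List.reverseRecOn with
  | nil => simp [lastNZ, PySem.List.enumerate_nil]
  | append_singleton xs x ih =>
      rw [lastNZ_append]
      split <;> simp <;> omega

theorem alt_eq_lastNZ (arr : List Int) (n : Int) :
    countZeroes_alt arr n = (arr.length : Int) - lastNZ arr := rfl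

theorem countZeroes_eq_alt (arr : List Int) (n : Int) :
    countZeroes arr n = countZeroes_alt arr n := by
  induction arr using List.reverseRecOn with
  | nil => simp [countZeroes, countZeroes_alt, countZeroesGoA,
      PySem.List.enumerate_nil]
  | append_singleton xs x ih =>
      rw [alt_eq_lastNZ, lastNZ_append]
      rw [alt_eq_lastNZ] at ih
      have hle := lastNZ_le xs
      by_cases hx : x = 0
      · have hA : countZeroes (xs ++ [x]) n = countZeroes xs n + 1 := by
          simp [countZeroes, countZeroesGoA, hx]
        rw [hA, ih]
        simp [hx]
        omega
      · have hA : countZeroes (xs ++ [x]) n = 0 := by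
          simp [countZeroes, countZeroesGoA, hx]
        rw [hA]
        simp [hx]

theorem countZeroes_spec : Claim_equal_countZeroes := by
  intro arr n _
  exact countZeroes_eq_alt arr n
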